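-- pv_equiv track=rewrite | github.com/JinHao-L/CTF-Archives | FLARE-ON 2021/Flare-On 8/02 - known/crack.py | rotr
-- ===== SOURCE A (Python) =====
-- def rotr(num, rotations, bits=8):
--     for i in range(0, rotations):
--         num &= (2**bits-1)
--         bit = num & 1
--         num >>= 1
--         if(bit):
--             num |= (1 << (bits-1))
--
--     return num
-- ===== SOURCE B (Python) =====
-- def rotr(num, rotations, bits=8):
--     if rotations <= 0:
--         return num
--     m = num % (1 << bits)
--     r = rotations % bits if bits else 0
--     return (m >> r) + ((m % (1 << r)) << (bits - r))
-- ===== Notes on version B (the rewrite author's own statement) =====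
-- stated objective: faster
-- what changed: Replaces the per-bit loop (rotations iterations of mask/shift/or) by a closed-form constant-time rotation: reduce rotations mod bits, then combine the two div/mod pieces of the masked value in one arithmetic expression.
import Mathlib
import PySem

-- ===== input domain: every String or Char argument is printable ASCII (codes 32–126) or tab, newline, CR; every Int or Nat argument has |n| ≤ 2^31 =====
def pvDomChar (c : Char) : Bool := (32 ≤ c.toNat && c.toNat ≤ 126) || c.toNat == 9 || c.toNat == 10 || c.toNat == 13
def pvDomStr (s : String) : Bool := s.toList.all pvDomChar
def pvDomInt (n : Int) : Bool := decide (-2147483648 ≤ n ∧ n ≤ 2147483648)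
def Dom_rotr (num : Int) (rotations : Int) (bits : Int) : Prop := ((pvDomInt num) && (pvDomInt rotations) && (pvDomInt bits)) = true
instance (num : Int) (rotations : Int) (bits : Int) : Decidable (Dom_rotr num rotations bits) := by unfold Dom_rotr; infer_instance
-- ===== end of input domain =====

-- B replaces A's per-bit rotation loop (rotations iterations) by one closed-form rotation using rotations mod bits.

-- ===== PORT A =====
-- The for-loop over range(0, rotations) is a foldl over pyRange (the loop variable is unused).
-- `2**bits` is ported as 2 ^ bits.toNat and `1 << (bits-1)` as 1 <<< (bits-1).toNat: exact whenever
-- the loop body runs under Pre_ (then bits ≥ 0, and the `if bit` branch is only reachable for bits ≥ 1).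
def rotr (num : Int) (rotations : Int) (bits : Int) : Int :=
  (PySem.List.pyRange 0 rotations 1).foldl (fun n _ =>
    let n := PySem.Int.band n (2 ^ bits.toNat - 1)
    let bit := PySem.Int.band n 1
    let n := n >>> (1 : Nat)
    if bit ≠ 0 then PySem.Int.bor n ((1 : Int) <<< (bits - 1).toNat) else n) num

-- ===== PORT B =====
-- `1 << bits`, `1 << r` and `<< (bits - r)` are ported with .toNat shift amounts: exact under Pre_
-- (on this branch bits ≥ 0, and 0 ≤ r < bits by Python's % with a positive divisor).
def rotr_alt (num : Int) (rotations : Int) (bits : Int) : Int :=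
  if rotations ≤ 0 then num
  else
    let m := PySem.Int.mod num ((1 : Int) <<< bits.toNat)
    let r := if bits ≠ 0 then PySem.Int.mod rotations bits else 0
    (m >>> r.toNat) + (PySem.Int.mod m ((1 : Int) <<< r.toNat)) <<< (bits - r).toNat

-- ===== PRECONDITION & SPEC =====
-- Pre_ excludes only bits < 0 together with rotations > 0: there Python A raises TypeError
-- (`num &= 2**bits - 1` with a float mask) and Python B raises ValueError (`1 << bits`).
def Pre_rotr (num : Int) (rotations : Int) (bits : Int) : Prop := 0 ≤ bits ∨ rotations ≤ 0
instance (num : Int) (rotations : Int) (bits : Int) : Decidable (Pre_rotr num rotations bits) := by unfold Pre_rotr; infer_instance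
def pvWitness_rotr : Int × Int × Int := (-37, 11, 8)

def Spec_rotr (num : Int) (rotations : Int) (bits : Int) (out : Int) : Prop := out = rotr_alt num rotations bits
instance (num : Int) (rotations : Int) (bits : Int) (out : Int) : Decidable (Spec_rotr num rotations bits out) := by unfold Spec_rotr; infer_instance

-- ===== CLAIM (what is proved, stated in full; the proofs are below) =====
def Claim_equal_rotr : Prop := ∀ (num : Int) (rotations : Int) (bits : Int), Dom_rotr num rotations bits → Pre_rotr num rotations bits → Spec_rotr num rotations bits (rotr num rotations bits)

-- ===== LEMMAS AND PROOFS =====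

-- Nat model of one iteration of A's loop body on an already-masked value
def pvStep (b : Nat) (n : Nat) : Nat := n / 2 + n % 2 * 2 ^ (b - 1)

-- Nat rotate-right of an already-masked value by r < b positions
def pvRot (b r m : Nat) : Nat := m / 2 ^ r + m % 2 ^ r * 2 ^ (b - r)

-- A's loop body as a named function (zeta-definitionally equal to the lambda in the port)
def pvBodyA (bits : Int) (n : Int) : Int :=
  if PySem.Int.band (PySem.Int.band n (2 ^ bits.toNat - 1)) 1 ≠ 0
  then PySem.Int.bor ((PySem.Int.band n (2 ^ bits.toNat - 1)) >>> (1 : Nat))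
        ((1 : Int) <<< (bits - 1).toNat)
  else (PySem.Int.band n (2 ^ bits.toNat - 1)) >>> (1 : Nat)

theorem pv_foldl_const {α β : Type} (l : List α) (f : β → β) (init : β) :
    l.foldl (fun n _ => f n) init = f^[l.length] init := by
  induction l generalizing init with
  | nil => rfl
  | cons x xs ih => simp [List.foldl_cons, ih, Function.iterate_succ_apply]

theorem pv_lor_two_pow (x k : Nat) (h : x < 2 ^ k) : x ||| 2 ^ k = x + 2 ^ k := by
  have := Nat.two_pow_add_eq_or_of_lt h 1
  simp at this
  rw [Nat.lor_comm, ← this, Nat.add_comm]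

theorem pv_cast_shr (x s : Nat) : ((x : Int) >>> s) = ((x / 2 ^ s : Nat) : Int) := by
  simp [Int.shiftRight_eq_div_pow, Nat.shiftRight_eq_div_pow]

theorem pv_cast_shl (x s : Nat) : ((x : Int) <<< s) = ((x * 2 ^ s : Nat) : Int) := by
  simp [Int.shiftLeft_eq, Nat.shiftLeft_eq]

theorem pv_one_shl (s : Nat) : (1 : Int) <<< s = ((2 ^ s : Nat) : Int) := by
  simp [Int.shiftLeft_eq]

-- Python's `n & (2**b - 1)` is `n mod 2**b`, also for negative n
theorem pv_band_mask (n : Int) (b : Nat) : PySem.Int.band n (2 ^ b - 1) = n % ((2 ^ b : Nat) : Int) := by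
  have hp : (0:Int) < (2:Int) ^ b := by positivity
  have hq : 0 < (2:Nat) ^ b := Nat.two_pow_pos b
  have h1 : ((2:Int) ^ b - 1).toNat = 2 ^ b - 1 := by
    have : ((2:Int) ^ b) = ((2 ^ b : Nat) : Int) := by push_cast; ring
    omega
  rcases le_or_gt 0 n with hn | hn
  · rw [PySem.Int.band_of_nonneg hn (by omega), h1, Nat.and_two_pow_sub_one_eq_mod]
    nth_rewrite 2 [← Int.toNat_of_nonneg hn]
    norm_cast
  · have hb : (0:Int) ≤ 2 ^ b - 1 := by omega
    have hdef : PySem.Int.band n (2 ^ b - 1) =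
        ↑(((2:Int) ^ b - 1).toNat - (((2:Int) ^ b - 1).toNat &&& (-n - 1).toNat)) := by
      unfold PySem.Int.band
      rw [if_neg (by omega), if_pos hb]
    rw [hdef, h1, Nat.land_comm, Nat.and_two_pow_sub_one_eq_mod]
    set m : Nat := (-n - 1).toNat with hm
    have hnm : n = -(m : Int) - 1 := by omega
    have h4 : m % 2 ^ b < 2 ^ b := Nat.mod_lt _ hq
    have hdvd : ((2 ^ b : Nat) : Int) ∣ (n - ↑(2 ^ b - 1 - m % 2 ^ b)) := by
      obtain ⟨c, hc⟩ := Nat.dvd_sub_mod (k := m) (n := 2 ^ b)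
      have hc2 : m = 2 ^ b * c + m % 2 ^ b := by
        have := Nat.mod_le m (2 ^ b); omega
      have hc' : (m : Int) = ((2 ^ b : Nat) : Int) * c + ↑(m % 2 ^ b) := by
        exact_mod_cast congrArg (Nat.cast : Nat → Int) hc2
      refine ⟨-(c : Int) - 1, ?_⟩
      have hcast : ((2 ^ b - 1 - m % 2 ^ b : Nat) : Int) = ((2 ^ b : Nat) : Int) - 1 - ↑(m % 2 ^ b) := by
        omega
      rw [hcast, hnm]
      linear_combination -hc'
    have h5 : n % ((2 ^ b : Nat) : Int) = (↑(2 ^ b - 1 - m % 2 ^ b) : Int) % ((2 ^ b : Nat) : Int) :=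
      Int.emod_eq_emod_iff_emod_sub_eq_zero.mpr (Int.emod_eq_zero_of_dvd hdvd)
    rw [h5, Int.emod_eq_of_lt (by omega) (by omega)]

theorem pv_step_lt {b n : Nat} (h : n < 2 ^ b) : pvStep b n < 2 ^ b := by
  unfold pvStep
  rcases Nat.eq_zero_or_pos b with hb | hb
  · subst hb; simp at h; simp [h]
  · have h2 : 2 ^ b = 2 * 2 ^ (b - 1) := by
      rw [← pow_succ']
      congr 1
      omega
    rcases Nat.mod_two_eq_zero_or_one n with hp | hp <;> rw [hp] <;> omega

theorem pv_key (a c m : Nat) :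
    (m / a + m % a * (2 * c)) / 2 + (m / a + m % a * (2 * c)) % 2 * (a * c)
      = m / (a * 2) + (m % a + a * (m / a % 2)) * c := by
  have h1 : m / a + m % a * (2 * c) = m / a + (m % a * c) * 2 := by ring
  rw [h1, Nat.add_mul_div_right _ _ (by norm_num), Nat.add_mul_mod_self_right,
    ← Nat.div_div_eq_div_mul]
  ring

theorem pv_step_rot {b r m : Nat} (hr : r < b) (hm : m < 2 ^ b) :
    pvStep b (pvRot b r m) = pvRot b ((r + 1) % b) m := by
  unfold pvStep pvRot
  have hbr : 2 ^ (b - r) = 2 * 2 ^ (b - r - 1) := by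
    rw [← pow_succ']; congr 1; omega
  rw [hbr]
  have hkey := pv_key (2 ^ r) (2 ^ (b - r - 1)) m
  have hb1 : 2 ^ r * 2 ^ (b - r - 1) = 2 ^ (b - 1) := by
    rw [← pow_add]; congr 1; omega
  rw [hb1] at hkey
  rw [hkey]
  rcases Nat.lt_or_ge (r + 1) b with hlt | hge
  · have hmod : (r + 1) % b = r + 1 := Nat.mod_eq_of_lt hlt
    have h2 : 2 ^ (r + 1) = 2 ^ r * 2 := by rw [pow_succ]
    have h4 : 2 ^ (b - (r + 1)) = 2 ^ (b - r - 1) := by rw [Nat.sub_sub]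
    rw [hmod, h4, h2, Nat.mod_mul]
  · have hrb : r + 1 = b := by omega
    have hmod : (r + 1) % b = 0 := by rw [hrb, Nat.mod_self]
    rw [hmod]
    have hc : b - r - 1 = 0 := by omega
    have h2 : 2 ^ r * 2 = 2 ^ b := by rw [← pow_succ, hrb]
    have h5 : m / 2 ^ b = 0 := Nat.div_eq_of_lt hm
    have h6 : m / 2 ^ r < 2 := Nat.div_lt_of_lt_mul (by rw [← h2] at hm; omega)
    have h7 : m / 2 ^ r % 2 = m / 2 ^ r := Nat.mod_eq_of_lt h6
    rw [hc, h2, h5, h7]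
    simp [Nat.mod_one, Nat.mod_add_div]

theorem pv_iterate_rot {b : Nat} (hb : 0 < b) (k m : Nat) (hm : m < 2 ^ b) :
    (pvStep b)^[k] m = pvRot b (k % b) m := by
  induction k with
  | zero => simp [pvRot, Nat.mod_one]
  | succ k ih =>
    rw [Function.iterate_succ_apply', ih, pv_step_rot (Nat.mod_lt k hb) hm]
    congr 1
    conv_rhs => rw [Nat.add_mod]
    conv_lhs => rw [Nat.add_mod]
    rw [Nat.mod_mod_of_dvd _ (dvd_refl b)]

theorem pv_rotr_eq (num rotations bits : Int) :
    rotr num rotations bits = (pvBodyA bits)^[rotations.toNat] num := by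
  show (PySem.List.pyRange 0 rotations 1).foldl (fun n _ => pvBodyA bits n) num = _
  rw [pv_foldl_const, PySem.List.length_pyRange_one]
  norm_num

theorem pv_bodyA_eq (bits : Int) (hb : 0 ≤ bits) (n : Int) :
    pvBodyA bits n
      = ((pvStep bits.toNat ((n % ((2 ^ bits.toNat : Nat) : Int)).toNat) : Nat) : Int) := by
  have hq : 0 < (2:Nat) ^ bits.toNat := Nat.two_pow_pos _
  unfold pvBodyA
  rw [pv_band_mask]
  set M : Int := n % ((2 ^ bits.toNat : Nat) : Int) with hMdef
  have hM0 : 0 ≤ M := Int.emod_nonneg n (by exact_mod_cast hq.ne')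
  have hMlt : M < ((2 ^ bits.toNat : Nat) : Int) := Int.emod_lt_of_pos n (by exact_mod_cast hq)
  have hMN : M = ((M.toNat : Nat) : Int) := (Int.toNat_of_nonneg hM0).symm
  have hMNlt : M.toNat < 2 ^ bits.toNat := by omega
  rw [PySem.Int.band_one, PySem.Int.mod_eq_emod_of_pos (by norm_num : (0:Int) < 2)]
  have hshr : M >>> (1:Nat) = ((M.toNat / 2 : Nat) : Int) := by
    rw [hMN, pv_cast_shr]
    norm_num
  rcases Nat.mod_two_eq_zero_or_one M.toNat with he | he
  · have hcond : ¬ (M % 2 ≠ 0) := by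
      rw [hMN]; push_cast; omega
    rw [if_neg hcond, hshr]
    unfold pvStep
    rw [he]
    norm_num
  · have hcond : M % 2 ≠ 0 := by
      rw [hMN]; push_cast; omega
    rw [if_pos hcond, hshr]
    have hb1 : 1 ≤ bits.toNat := by
      by_contra hcon
      interval_cases h : bits.toNat
      · simp at hMNlt; omega
    have hbm : (bits - 1).toNat = bits.toNat - 1 := by omega
    rw [hbm, pv_one_shl]
    rw [PySem.Int.bor_of_nonneg (by positivity) (by positivity)]
    have h2 : 2 ^ bits.toNat = 2 * 2 ^ (bits.toNat - 1) := by
      rw [← pow_succ']; congr 1; omega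
    have hhalf : M.toNat / 2 < 2 ^ (bits.toNat - 1) := by omega
    simp only [Int.toNat_natCast]
    rw [pv_lor_two_pow _ _ hhalf]
    unfold pvStep
    rw [he]
    norm_num

theorem pv_iterA (bits : Int) (hb : 0 ≤ bits) (j : Nat) :
    ∀ x : Nat, x < 2 ^ bits.toNat →
      (pvBodyA bits)^[j] ((x : Nat) : Int) = (((pvStep bits.toNat)^[j] x : Nat) : Int) := by
  induction j with
  | zero => intro x _; simp
  | succ j ih =>
    intro x hx
    rw [Function.iterate_succ_apply, Function.iterate_succ_apply]
    have h1 : pvBodyA bits ((x : Nat) : Int) = ((pvStep bits.toNat x : Nat) : Int) := by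
      rw [pv_bodyA_eq bits hb]
      congr 2
      rw [Int.emod_eq_of_lt (by positivity) (by exact_mod_cast hx)]
      simp
    rw [h1]
    exact ih _ (pv_step_lt hx)

-- ===== VERDICT (by name: the statement is the Claim_ definition above) =====
theorem rotr_spec : Claim_equal_rotr := by
  unfold Claim_equal_rotr
  intro num rotations bits _ hpre
  unfold Spec_rotr rotr_alt
  by_cases hrot : rotations ≤ 0
  · rw [if_pos hrot]
    unfold rotr
    rw [PySem.List.pyRange_one_eq_nil hrot]
    rfl
  · rw [if_neg hrot]
    push_neg at hrot
    have hb : 0 ≤ bits := hpre.resolve_right (by omega)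
    have hq : 0 < (2:Nat) ^ bits.toNat := Nat.two_pow_pos _
    have hbits : bits = (bits.toNat : Int) := (Int.toNat_of_nonneg hb).symm
    have hk1 : 1 ≤ rotations.toNat := by omega
    have hrotk : rotations = (rotations.toNat : Int) := by omega
    have hm : PySem.Int.mod num ((1:Int) <<< bits.toNat)
        = num % ((2 ^ bits.toNat : Nat) : Int) := by
      rw [pv_one_shl, PySem.Int.mod_eq_emod_of_pos (by exact_mod_cast hq)]
    set M : Nat := (num % ((2 ^ bits.toNat : Nat) : Int)).toNat with hMdef
    have hMcast : num % ((2 ^ bits.toNat : Nat) : Int) = ((M : Nat) : Int) := by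
      have := Int.emod_nonneg num (show ((2 ^ bits.toNat : Nat) : Int) ≠ 0 by exact_mod_cast hq.ne')
      omega
    have hMlt : M < 2 ^ bits.toNat := by
      have := Int.emod_lt_of_pos num (show (0:Int) < ((2 ^ bits.toNat : Nat) : Int) by exact_mod_cast hq)
      omega
    -- A's loop is k iterations of pvStep on the masked value
    have hA : rotr num rotations bits = (((pvStep bits.toNat)^[rotations.toNat] M : Nat) : Int) := by
      rw [pv_rotr_eq]
      obtain ⟨k', hk'⟩ : ∃ k', rotations.toNat = k' + 1 := ⟨rotations.toNat - 1, by omega⟩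
      rw [hk', Function.iterate_succ_apply]
      have h1 : pvBodyA bits num = ((pvStep bits.toNat M : Nat) : Int) := by
        rw [pv_bodyA_eq bits hb]
      rw [h1, pv_iterA bits hb k' _ (pv_step_lt hMlt), ← Function.iterate_succ_apply]
    rw [hA, hm, hMcast]
    by_cases hb0 : bits = 0
    · -- bits = 0: both sides are 0 (the masked value is 0 and stays 0)
      have hbz : bits.toNat = 0 := by omega
      have hM0 : M = 0 := by rw [hbz] at hMlt; omega
      have hfix : pvStep bits.toNat 0 = 0 := by unfold pvStep; norm_num
      rw [hM0, Function.iterate_fixed hfix]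
      rw [if_neg (by simp [hb0])]
      norm_num [pv_one_shl, PySem.Int.mod_natCast, pv_cast_shr]
    · -- bits ≥ 1: B computes the closed-form rotation by rotations % bits
      have hbpos : 0 < bits.toNat := by omega
      have hr : (if bits ≠ 0 then PySem.Int.mod rotations bits else 0)
          = ((rotations.toNat % bits.toNat : Nat) : Int) := by
        rw [if_pos hb0]
        rw [hrotk, hbits, PySem.Int.mod_natCast]
        simp
      rw [hr]
      have hrlt : rotations.toNat % bits.toNat < bits.toNat := Nat.mod_lt _ hbpos
      have hsub : (bits - ((rotations.toNat % bits.toNat : Nat) : Int)).toNat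
          = bits.toNat - rotations.toNat % bits.toNat := by omega
      simp only [Int.toNat_natCast]
      rw [hsub, pv_cast_shr, pv_one_shl, PySem.Int.mod_natCast, pv_cast_shl]
      rw [pv_iterate_rot hbpos _ _ hMlt]
      unfold pvRot
      push_cast
      ring
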